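-- pv_equiv track=rewrite | github.com/gksrb2656/AlgoPractice | List2/2048.py | del_zero
-- ===== SOURCE A (Python) =====
-- def del_zero(tile, N, dir):
--     if dir == 'up':
--         for i in range(N):
--             for j in range(N):
--                 k = i
--                 while (tile[k][j] == 0) and k<N-1:
--                     if tile[k+1][j] != 0:
--                         tile[i][j], tile[k+1][j] = tile[k+1][j], tile[i][j]
--                         break
--                     k += 1
--     elif dir == 'down':
--         for i in range(N,0,-1):
--             for j in range(N):
--                 k = i-1
--                 while (tile[k][j] == 0) and k > 0:
--                     if tile[k-1][j] != 0:
--                         tile[i-1][j], tile[k-1][j] = tile[k-1][j], tile[i-1][j]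
--                         break
--                     k -= 1
--     elif dir == 'right':
--         for i in range(N,0, -1):
--             for j in range(N,):
--                 k = i-1
--                 while (tile[j][k] == 0) and k > 0:
--                     if tile[j][k-1] != 0:
--                         tile[j][i-1], tile[j][k - 1] = tile[j][k - 1], tile[j][i-1]
--                         break
--                     k -= 1
--     elif dir == 'left':
--         for i in range(N):
--             for j in range(N):
--                 k = i
--                 while (tile[j][k] == 0) and k < N-1:
--                     if tile[j][k + 1] != 0:
--                         tile[j][i], tile[j][k + 1] = tile[j][k + 1], tile[j][i]
--                         break
--                     k += 1
--     return tile
-- ===== SOURCE B (Python) =====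
-- def _compact(seg, n, front):
--     nz = [x for x in seg if x != 0]
--     pad = [0] * (n - len(nz))
--     return nz + pad if front else pad + nz
--
-- def del_zero(tile, N, dir):
--     # One pass per line: collect the non-zero tiles in order, pad with zeros.
--     # Mutates tile in place (like the original) and returns it.
--     if dir == 'left' or dir == 'right':
--         for i in range(N):
--             tile[i][:N] = _compact(tile[i][:N], N, dir == 'left')
--     elif dir == 'up' or dir == 'down':
--         grid = [list(col) for col in zip(*(row[:N] for row in tile[:N]))]
--         for j in range(N):
--             grid[j] = _compact(grid[j], N, dir == 'up')
--         back = [list(r) for r in zip(*grid)]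
--         for i in range(N):
--             tile[i][:N] = back[i]
--     return tile
-- ===== Notes on version B (the rewrite author's own statement) =====
-- stated objective: alternative
-- what changed: Replaces A's per-cell selection scan (for every cell, a while loop searching the rest of the line for a non-zero tile to swap in) by a single-pass compaction per row/column: collect the non-zeros in order and pad with zeros (columns handled by transposing once).
import Mathlib
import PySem

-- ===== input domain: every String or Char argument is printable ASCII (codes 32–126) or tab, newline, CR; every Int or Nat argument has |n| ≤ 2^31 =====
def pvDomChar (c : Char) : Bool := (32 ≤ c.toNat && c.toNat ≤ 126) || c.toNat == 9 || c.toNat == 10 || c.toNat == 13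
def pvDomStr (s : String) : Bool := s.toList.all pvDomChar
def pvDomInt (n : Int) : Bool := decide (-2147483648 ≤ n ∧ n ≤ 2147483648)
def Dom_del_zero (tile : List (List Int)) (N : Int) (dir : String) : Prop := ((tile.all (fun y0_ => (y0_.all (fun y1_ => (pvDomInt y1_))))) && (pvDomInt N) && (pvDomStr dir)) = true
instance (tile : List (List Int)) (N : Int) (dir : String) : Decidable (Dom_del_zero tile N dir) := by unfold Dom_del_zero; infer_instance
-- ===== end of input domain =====

-- B replaces A's per-cell selection scan by a single-pass compaction of each row/column
-- (collect non-zeros, pad with zeros; columns via one transpose) — a different algorithm,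
-- same task (objective: alternative).
-- Both programs mutate `tile` in place and return it; the equivalence proved here is about
-- the returned value (B performs the same in-place mutation in Python).

-- ===== PORT A =====
-- tile[i][j] read (indices here are always ≥ 0 in A, so plain Nat indexing with default):
def gget (t : List (List Int)) (i j : Nat) : Int := (t.getD i []).getD j 0
-- tile[i][j] = v
def gset (t : List (List Int)) (i j : Nat) (v : Int) : List (List Int) :=
  t.modify i (fun row => row.set j v)

-- 'up' branch inner while-loop (i, j fixed, k the scanning index)
def aWhileU (n i j : Nat) (t : List (List Int)) (k : Nat) : List (List Int) :=
  if h : gget t k j = 0 ∧ k < n - 1 then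
    if gget t (k+1) j ≠ 0 then
      gset (gset t i j (gget t (k+1) j)) (k+1) j (gget t i j)
    else aWhileU n i j t (k+1)
  else t
termination_by n - 1 - k
decreasing_by omega

-- 'down' branch inner while-loop (m = Python's i-1)
def aWhileD (m j : Nat) (t : List (List Int)) (k : Nat) : List (List Int) :=
  if h : gget t k j = 0 ∧ 0 < k then
    if gget t (k-1) j ≠ 0 then
      gset (gset t m j (gget t (k-1) j)) (k-1) j (gget t m j)
    else aWhileD m j t (k-1)
  else t
termination_by k
decreasing_by omega

-- 'right' branch inner while-loop (m = Python's i-1, j the row)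
def aWhileR (m j : Nat) (t : List (List Int)) (k : Nat) : List (List Int) :=
  if h : gget t j k = 0 ∧ 0 < k then
    if gget t j (k-1) ≠ 0 then
      gset (gset t j m (gget t j (k-1))) j (k-1) (gget t j m)
    else aWhileR m j t (k-1)
  else t
termination_by k
decreasing_by omega

-- 'left' branch inner while-loop
def aWhileL (n i j : Nat) (t : List (List Int)) (k : Nat) : List (List Int) :=
  if h : gget t j k = 0 ∧ k < n - 1 then
    if gget t j (k+1) ≠ 0 then
      gset (gset t j i (gget t j (k+1))) j (k+1) (gget t j i)
    else aWhileL n i j t (k+1)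
  else t
termination_by n - 1 - k
decreasing_by omega

-- range(N) → List.range N.toNat; range(N,0,-1) with loop variable i, used only as i-1,
-- → (List.range N.toNat).reverse with loop variable m = i-1.
def del_zero (tile : List (List Int)) (N : Int) (dir : String) : List (List Int) :=
  let n := N.toNat
  if dir == "up" then
    (List.range n).foldl (fun t i => (List.range n).foldl (fun t j => aWhileU n i j t i) t) tile
  else if dir == "down" then
    (List.range n).reverse.foldl (fun t m => (List.range n).foldl (fun t j => aWhileD m j t m) t) tile
  else if dir == "right" then
    (List.range n).reverse.foldl (fun t m => (List.range n).foldl (fun t j => aWhileR m j t m) t) tile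
  else if dir == "left" then
    (List.range n).foldl (fun t i => (List.range n).foldl (fun t j => aWhileL n i j t i) t) tile
  else tile

-- ===== PORT B =====
-- _compact(seg, n, front): non-zeros in order, padded with zeros
def pyCompact (seg : List Int) (n : Nat) (front : Bool) : List Int :=
  let nz := seg.filter (fun x => x != 0)
  let pad := List.replicate (n - nz.length) 0
  if front then nz ++ pad else pad ++ nz

-- zip(*(row[:N] for row in tile[:N])) : the N×N transpose (entry (j,i) = tile[i][j])
def transp (t : List (List Int)) (n : Nat) : List (List Int) :=
  (List.range n).map (fun j => (List.range n).map (fun i => gget t i j))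

def del_zero_alt (tile : List (List Int)) (N : Int) (dir : String) : List (List Int) :=
  let n := N.toNat
  if dir == "left" || dir == "right" then
    -- tile[i][:N] = _compact(tile[i][:N], N, dir == 'left')
    (List.range n).foldl
      (fun t i => t.modify i (fun row => pyCompact (row.take n) n (dir == "left") ++ row.drop n)) tile
  else if dir == "up" || dir == "down" then
    let g0 := transp tile n
    -- grid[j] = _compact(grid[j], N, dir == 'up')
    let g1 := (List.range n).foldl (fun g j => g.modify j (fun c => pyCompact c n (dir == "up"))) g0
    let back := transp g1 n      -- zip(*grid) back
    -- tile[i][:N] = back[i]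
    (List.range n).foldl (fun t i => t.modify i (fun row => back.getD i [] ++ row.drop n)) tile
  else tile

-- ===== PRECONDITION & SPEC =====
-- For a real direction with N > 0, A raises IndexError exactly when the grid lacks an N×N
-- top-left block (fewer than N rows, or one of the first N rows shorter than N).
-- Pre_ excludes exactly those raising inputs and nothing else.
def Pre_del_zero (tile : List (List Int)) (N : Int) (dir : String) : Prop :=
  (dir = "up" ∨ dir = "down" ∨ dir = "left" ∨ dir = "right") →
    (N ≤ 0 ∨ (N ≤ (tile.length : Int) ∧ ∀ r ∈ tile.take N.toNat, N ≤ (r.length : Int)))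
instance (tile : List (List Int)) (N : Int) (dir : String) : Decidable (Pre_del_zero tile N dir) := by
  unfold Pre_del_zero; infer_instance

def pvWitness_del_zero : List (List Int) × Int × String := ([[2, 0, 2], [0, 0, 4], [2, 0, 0]], 3, "up")

def Spec_del_zero (tile : List (List Int)) (N : Int) (dir : String) (out : List (List Int)) : Prop := out = del_zero_alt tile N dir
instance (tile : List (List Int)) (N : Int) (dir : String) (out : List (List Int)) : Decidable (Spec_del_zero tile N dir out) := by unfold Spec_del_zero; infer_instance

-- ===== CLAIM (what is proved, stated in full; the proofs are below) =====
def Claim_equal_del_zero : Prop := ∀ (tile : List (List Int)) (N : Int) (dir : String), Dom_del_zero tile N dir → Pre_del_zero tile N dir → Spec_del_zero tile N dir (del_zero tile N dir)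

-- ===== LEMMAS AND PROOFS =====

-- square n×n grid
def Sq (n : Nat) (t : List (List Int)) : Prop :=
  t.length = n ∧ ∀ (i : Nat) (h : i < t.length), t[i].length = n

-- grid with at least n rows whose first n rows have at least n entries (A's active block exists)
def GeN (n : Nat) (t : List (List Int)) : Prop :=
  n ≤ t.length ∧ ∀ i, i < n → n ≤ (t.getD i []).length

-- the active n×n top-left block, and patching a block back into a larger grid
def core (n : Nat) (t : List (List Int)) : List (List Int) :=
  (List.range n).map (fun i => (t.getD i []).take n)
def patch (n : Nat) (t0 s : List (List Int)) : List (List Int) :=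
  t0.mapIdx (fun i row => if i < n then s.getD i [] ++ row.drop n else row)

-- the compacted line, non-zeros first / last
def compactL (n : Nat) (r : List Int) : List Int :=
  r.filter (fun x => x != 0) ++ List.replicate (n - (r.filter (fun x => x != 0)).length) 0
def compactR (n : Nat) (r : List Int) : List Int :=
  List.replicate (n - (r.filter (fun x => x != 0)).length) 0 ++ r.filter (fun x => x != 0)

-- row-level versions of the left/right while loops
def rwL (n i : Nat) (r : List Int) (k : Nat) : List Int :=
  if h : r.getD k 0 = 0 ∧ k < n - 1 then
    if r.getD (k+1) 0 ≠ 0 then (r.set i (r.getD (k+1) 0)).set (k+1) (r.getD i 0)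
    else rwL n i r (k+1)
  else r
termination_by n - 1 - k
decreasing_by omega

def rwR (m : Nat) (r : List Int) (k : Nat) : List Int :=
  if h : r.getD k 0 = 0 ∧ 0 < k then
    if r.getD (k-1) 0 ≠ 0 then (r.set m (r.getD (k-1) 0)).set (k-1) (r.getD m 0)
    else rwR m r (k-1)
  else r
termination_by k
decreasing_by omega


-- ---------- generic list/fold lemmas ----------

theorem pv_modify_cons_succ {α : Type} (x : α) (t : List α) (i : Nat) (f : α → α) :
    (x :: t).modify (i+1) f = x :: t.modify i f := by
  simp [List.modify]

theorem pv_modify_zero_cons {α : Type} (x : α) (t : List α) (f : α → α) :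
    (x :: t).modify 0 f = f x :: t := by
  simp [List.modify]

theorem pv_foldl_congr_inv {α β : Type} (P : α → Prop) (f g : α → β → α) (l : List β) :
    ∀ t, P t → (∀ s b, P s → b ∈ l → f s b = g s b) → (∀ s b, P s → b ∈ l → P (g s b)) →
      l.foldl f t = l.foldl g t := by
  induction l with
  | nil => intro t _ _ _; rfl
  | cons x l ih =>
    intro t hP hfg hPg
    have hx : f t x = g t x := hfg t x hP (by simp)
    have hPx : P (g t x) := hPg t x hP (by simp)
    simp only [List.foldl_cons, hx]
    exact ih (g t x) hPx (fun s b hs hb => hfg s b hs (by simp [hb]))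
      (fun s b hs hb => hPg s b hs (by simp [hb]))

theorem pv_foldl_preserve {α β : Type} (P : α → Prop) (f : α → β → α) (l : List β) :
    ∀ t, P t → (∀ s b, P s → b ∈ l → P (f s b)) → P (l.foldl f t) := by
  induction l with
  | nil => intro t h _; exact h
  | cons x l ih =>
    intro t hP hstep
    exact ih (f t x) (hstep t x hP (by simp))
      (fun s b hs hb => hstep s b hs (by simp [hb]))

theorem pv_foldl_sim {α β ι : Type} (R : α → β → Prop) (f : α → ι → α) (g : β → ι → β) :
    ∀ (l : List ι) (a : α) (b : β), R a b →
      (∀ a b x, R a b → x ∈ l → R (f a x) (g b x)) →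
      R (l.foldl f a) (l.foldl g b) := by
  intro l
  induction l with
  | nil => intro a b h _; exact h
  | cons x l ih =>
    intro a b h hstep
    exact ih (f a x) (g b x) (hstep a b x h (by simp))
      (fun a b y hy hmem => hstep a b y hy (by simp [hmem]))

theorem pv_foldl_modify_shift {α : Type} (G : Nat → α → α) (l : List Nat) :
    ∀ (x : α) (t : List α),
      l.foldl (fun s i => s.modify (i+1) (G i)) (x :: t)
        = x :: l.foldl (fun s i => s.modify i (G i)) t := by
  induction l with
  | nil => intro x t; rfl
  | cons a l ih =>
    intro x t
    simp only [List.foldl_cons, pv_modify_cons_succ]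
    exact ih x (t.modify a (G a))

theorem pv_foldl_modify_mapIdx {α : Type} (F : Nat → α → α) :
    ∀ (t : List α),
      (List.range t.length).foldl (fun s i => s.modify i (F i)) t = t.mapIdx F := by
  intro t
  induction t generalizing F with
  | nil => rfl
  | cons a t ih =>
    have h1 : List.range (a :: t).length = 0 :: (List.range t.length).map Nat.succ := by
      simp [List.range_succ_eq_map]
    rw [h1]
    simp only [List.foldl_cons, pv_modify_zero_cons, List.foldl_map]
    have h2 : ∀ (s : List α) (i : Nat), s.modify (Nat.succ i) (F (Nat.succ i))
        = s.modify (i+1) (F (i+1)) := fun _ _ => rfl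
    rw [List.mapIdx_cons]
    calc (List.range t.length).foldl (fun s i => s.modify i.succ (F i.succ)) (F 0 a :: t)
        = F 0 a :: (List.range t.length).foldl (fun s i => s.modify i (F (i+1))) t := by
          exact pv_foldl_modify_shift (fun i => F (i+1)) (List.range t.length) (F 0 a) t
      _ = F 0 a :: t.mapIdx (fun i => F (i+1)) := by rw [ih (fun i => F (i+1))]

theorem pv_mapIdx_const {α β : Type} (f : α → β) (t : List α) :
    t.mapIdx (fun _ a => f a) = t.map f := by
  induction t with
  | nil => rfl
  | cons a t ih => simp [List.mapIdx_cons, ih]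

theorem pv_mapIdx_congr {α β : Type} (f g : Nat → α → β) (t : List α)
    (h : ∀ (i : Nat) (hi : i < t.length), f i (t[i]) = g i (t[i])) :
    t.mapIdx f = t.mapIdx g := by
  apply List.ext_getElem
  · simp
  · intro i h1 h2
    simp only [List.getElem_mapIdx]
    exact h i (by simpa using h1)

-- the bounded modify-fold, on a list of any length: first n entries mapped, the rest kept
theorem pv_foldl_modify_range {α : Type} (F : Nat → α → α) (n : Nat) (t : List α) :
    (List.range n).foldl (fun s i => s.modify i (F i)) t
      = t.mapIdx (fun i row => if i < n then F i row else row) := by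
  induction n with
  | zero =>
    rw [show (fun (i : Nat) (row : α) => if i < 0 then F i row else row)
        = (fun _ row => row) from by funext i r; simp]
    rw [pv_mapIdx_const (fun a => a) t]
    simp
  | succ n ih =>
    rw [List.range_succ, List.foldl_append, ih]
    simp only [List.foldl_cons, List.foldl_nil]
    apply List.ext_getElem
    · simp
    · intro i h1 h2
      simp only [List.length_mapIdx] at h2
      simp only [List.getElem_modify, List.getElem_mapIdx]
      by_cases hin : n = i
      · subst hin
        rw [if_pos rfl, if_neg (by omega), if_pos (by omega)]
      · rw [if_neg hin]
        by_cases hlt : i < n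
        · rw [if_pos hlt, if_pos (by omega)]
        · rw [if_neg hlt, if_neg (by omega)]

theorem pv_foldl_map_comm {α : Type} (g : Nat → α → α) (l : List Nat) :
    ∀ t : List α,
      l.foldl (fun t i => t.map (g i)) t = t.map (fun a => l.foldl (fun a i => g i a) a) := by
  induction l with
  | nil => intro t; simp
  | cons x l ih =>
    intro t
    simp only [List.foldl_cons]
    rw [ih (t.map (g x))]
    simp [List.map_map, Function.comp]

theorem pv_foldl_reverse_conj (f : Nat → List Int → List Int) (h : Nat → Nat) (l : List Nat) :
    ∀ r : List Int,
      l.foldl (fun r m => (f (h m) r.reverse).reverse) r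
        = ((l.map h).foldl (fun r i => f i r) r.reverse).reverse := by
  induction l with
  | nil => intro r; simp
  | cons x l ih =>
    intro r
    simp only [List.foldl_cons, List.map_cons]
    rw [ih ((f (h x) r.reverse).reverse), List.reverse_reverse]

theorem pv_map_reverse_range (n : Nat) :
    (List.range n).reverse.map (fun m => n - 1 - m) = List.range n := by
  apply List.ext_getElem
  · simp
  · intro i h1 h2
    simp only [List.length_map, List.length_reverse, List.length_range] at h1
    simp only [List.getElem_map, List.getElem_reverse, List.getElem_range,
      List.length_range, List.length_reverse]
    omega

theorem pv_modify_modify {α : Type} (t : List α) (j : Nat) (f g : α → α) :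
    (t.modify j f).modify j g = t.modify j (fun a => g (f a)) := by
  apply List.ext_getElem
  · simp
  · intro i h1 h2
    simp only [List.getElem_modify]
    split <;> simp_all


-- ---------- getD / set on appended lists ----------

theorem pv_getD_append (q l : List Int) (s : Nat) :
    (q ++ l).getD (q.length + s) 0 = l.getD s 0 := by
  induction q with
  | nil => simp
  | cons a q ih => simpa [Nat.succ_add, List.getD] using ih

theorem pv_getD_append_left (a b : List Int) (j : Nat) (hj : j < a.length) :
    (a ++ b).getD j 0 = a.getD j 0 := by
  rw [List.getD_eq_getElem _ _ (by simp; omega), List.getD_eq_getElem _ _ hj]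
  exact List.getElem_append_left hj

theorem pv_getD_take (r : List Int) (n j : Nat) (hj : j < n) :
    (r.take n).getD j 0 = r.getD j 0 := by
  by_cases h : j < r.length
  · rw [List.getD_eq_getElem _ _ (by simp; omega), List.getD_eq_getElem _ _ h]
    simp [List.getElem_take]
  · rw [List.getD_eq_default _ _ (by simp; omega), List.getD_eq_default _ _ (by omega)]

theorem pv_set_append (q l : List Int) (x v : Int) :
    (q ++ x :: l).set q.length v = q ++ v :: l := by
  rw [List.set_append]; simp

theorem pv_set_append_left (a b : List Int) (j : Nat) (v : Int) (hj : j < a.length) :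
    (a ++ b).set j v = a.set j v ++ b := by
  rw [List.set_append, if_pos hj]

theorem pv_rwL_length_fuel (n i : Nat) :
    ∀ (d k : Nat) (r : List Int), n - 1 - k ≤ d → (rwL n i r k).length = r.length := by
  intro d
  induction d with
  | zero =>
    intro k r h
    rw [rwL, dif_neg]
    rintro ⟨-, h2⟩; omega
  | succ d ih =>
    intro k r h
    rw [rwL]
    split
    · split
      · simp
      · exact ih (k+1) r (by omega)
    · rfl

theorem pv_rwL_length (n i : Nat) (r : List Int) (k : Nat) :
    (rwL n i r k).length = r.length :=
  pv_rwL_length_fuel n i (n - 1 - k) k r (Nat.le_refl _)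

theorem pv_rwR_length (m : Nat) : ∀ (k : Nat) (r : List Int), (rwR m r k).length = r.length := by
  intro k
  induction k with
  | zero =>
    intro r
    rw [rwR, dif_neg]
    rintro ⟨-, h2⟩; omega
  | succ k ih =>
    intro r
    rw [rwR]
    split
    · split
      · simp
      · simpa using ih r
    · rfl

-- ---------- the while-loop scan: finds the first non-zero and swaps it in ----------

theorem pv_rwL_scan (n i : Nat) :
    ∀ (z q tail : List Int) (v : Int), (∀ x ∈ z, x = 0) → v ≠ 0 →
      n = q.length + 1 + z.length + 1 + tail.length →
      rwL n i (q ++ 0 :: (z ++ v :: tail)) q.length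
        = ((q ++ 0 :: (z ++ v :: tail)).set i v).set (q.length + z.length + 1)
            ((q ++ 0 :: (z ++ v :: tail)).getD i 0) := by
  intro z
  induction z with
  | nil =>
    intro q tail v _ hv hn
    rw [rwL]
    rw [dif_pos ?hc]
    case hc =>
      constructor
      · simpa using pv_getD_append q (0 :: v :: tail) 0
      · simp at hn ⊢; omega
    have hg : (q ++ 0 :: ([] ++ v :: tail)).getD (q.length + 1) 0 = v := by
      simpa using pv_getD_append q (0 :: v :: tail) 1
    rw [if_pos (by rw [hg]; exact hv), hg]
    simp
  | cons z0 z' ih =>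
    intro q tail v hz hv hn
    have hz0 : z0 = 0 := hz z0 (by simp)
    rw [rwL]
    rw [dif_pos ?hc]
    case hc =>
      constructor
      · simpa using pv_getD_append q (0 :: (z0 :: z') ++ v :: tail) 0
      · simp at hn ⊢; omega
    have hg : (q ++ 0 :: ((z0 :: z') ++ v :: tail)).getD (q.length + 1) 0 = 0 := by
      have := pv_getD_append q (0 :: (z0 :: z') ++ v :: tail) 1
      simpa [hz0] using this
    rw [if_neg (by rw [hg]; simp)]
    have hre : q ++ 0 :: ((z0 :: z') ++ v :: tail) = (q ++ [0]) ++ 0 :: (z' ++ v :: tail) := by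
      simp [hz0]
    rw [hre]
    have ih' := ih (q ++ [0]) tail v (fun x hx => hz x (by simp [hx])) hv
      (by simp only [List.length_append, List.length_cons, List.length_nil, List.nil_append, List.append_nil, Nat.add_zero] at hn ⊢ <;> omega)
    have hlen : (q ++ [0]).length = q.length + 1 := by simp
    rw [hlen] at ih'
    have hidx : q.length + 1 + z'.length + 1 = q.length + (z0 :: z').length + 1 := by
      simp [List.length_cons]; omega
    rw [hidx] at ih'
    rw [ih', ← hre]

-- ---------- the while-loop scan: only zeros ahead, no change ----------

theorem pv_rwL_allzero (n i : Nat) :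
    ∀ (z q : List Int), (∀ x ∈ z, x = 0) → n = q.length + z.length →
      rwL n i (q ++ z) q.length = q ++ z := by
  intro z
  induction z with
  | nil =>
    intro q _ hn
    rw [rwL, dif_neg]
    rintro ⟨-, h2⟩; simp at hn; omega
  | cons z0 z' ih =>
    intro q hz hn
    by_cases hk : q.length < n - 1
    · rw [rwL]
      rw [dif_pos ⟨by simpa [hz z0 (by simp)] using pv_getD_append q (z0 :: z') 0, hk⟩]
      have hg : (q ++ z0 :: z').getD (q.length + 1) 0 = 0 := by
        have := pv_getD_append q (z0 :: z') 1
        rw [this]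
        cases z' with
        | nil => simp [List.getD]
        | cons z1 z'' => simpa [List.getD] using hz z1 (by simp)
      rw [if_neg (by rw [hg]; simp)]
      have hre : q ++ z0 :: z' = (q ++ [z0]) ++ z' := by simp
      rw [hre]
      have ih' := ih (q ++ [z0]) (fun x hx => hz x (by simp [hx])) (by simp only [List.length_append, List.length_cons, List.length_nil, List.nil_append, List.append_nil, Nat.add_zero] at hn ⊢ <;> omega)
      have hlen : (q ++ [z0]).length = q.length + 1 := by simp
      rw [hlen] at ih'
      rw [ih']
    · rw [rwL, dif_neg]
      rintro ⟨-, h2⟩; exact hk h2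

-- ---------- every line is all-zero or zeros-then-a-nonzero ----------

theorem pv_zero_decomp :
    ∀ (l : List Int), (∀ x ∈ l, x = 0) ∨
      ∃ z w tail, (∀ x ∈ z, x = 0) ∧ w ≠ 0 ∧ l = z ++ w :: tail := by
  intro l
  induction l with
  | nil => left; simp
  | cons x l ih =>
    by_cases hx : x = 0
    · rcases ih with h | ⟨z, w, tail, hz, hw, rfl⟩
      · left; intro y hy; rcases List.mem_cons.mp hy with rfl | hy
        · exact hx
        · exact h y hy
      · right; exact ⟨x :: z, w, tail, by simpa [hx] using hz, hw, by simp⟩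
    · right; exact ⟨[], x, l, by simp, hx, by simp⟩

-- ---------- main invariant: folding the while-loops compacts the line ----------

theorem pv_rwL_fold_inv (n : Nat) :
    ∀ (m : Nat) (qa qz rest : List Int),
      (∀ x ∈ qa, x ≠ 0) → (∀ x ∈ qz, x = 0) → (qz ≠ [] → ∀ x ∈ rest, x = 0) →
      rest.length = m → n = qa.length + qz.length + m →
      (List.range' (qa.length + qz.length) m).foldl (fun r i => rwL n i r i) (qa ++ qz ++ rest)
        = qa ++ qz ++ rest.filter (fun x => x != 0)
            ++ List.replicate (m - (rest.filter (fun x => x != 0)).length) 0 := by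
  intro m
  induction m with
  | zero =>
    intro qa qz rest _ _ _ hlen _
    have : rest = [] := List.eq_nil_of_length_eq_zero hlen
    subst this; simp
  | succ m ih =>
    intro qa qz rest ha hz h3 hlen hn
    cases rest with
    | nil => simp at hlen
    | cons v tail =>
      simp only [List.range'_succ, List.foldl_cons]
      by_cases hv : v = 0
      · subst hv
        rcases pv_zero_decomp tail with htail | ⟨z, w, tail', hzz, hw, rfl⟩
        · -- everything left is zero: the while loop does nothing, ever after
          have hstep : rwL n (qa.length + qz.length) (qa ++ qz ++ 0 :: tail)
              (qa.length + qz.length) = qa ++ qz ++ 0 :: tail := by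
            have := pv_rwL_allzero n (qa.length + qz.length) (0 :: tail) (qa ++ qz)
              (by intro x hx; rcases List.mem_cons.mp hx with rfl | hx; rfl; exact htail x hx)
              (by simp only [List.length_append, List.length_cons] at hlen hn ⊢; omega)
            simpa [List.append_assoc] using this
          rw [hstep]
          have hre : qa ++ qz ++ 0 :: tail = qa ++ (qz ++ [0]) ++ tail := by simp
          rw [hre]
          have ih' := ih qa (qz ++ [0]) tail ha
            (by intro x hx; rcases List.mem_append.mp hx with hx | hx
                · exact hz x hx
                · simpa using List.mem_singleton.mp hx)
            (fun _ => htail) (by simpa using hlen)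
            (by simp only [List.length_append, List.length_cons, List.length_nil]; omega)
          have hlen2 : qa.length + (qz ++ [0]).length = qa.length + qz.length + 1 := by
            simp; omega
          rw [hlen2] at ih'
          rw [ih']
          have hf0 : tail.filter (fun x => x != 0) = [] :=
            List.filter_eq_nil_iff.mpr (by intro a haa; simp [htail a haa])
          have hf1 : ((0 : Int) :: tail).filter (fun x => x != 0) = [] := by
            simp [List.filter_cons, hf0]
          rw [hf0, hf1]
          simp [List.replicate_succ]
        · -- zeros then a first non-zero w: the loop swaps w to the front
          have hqz : qz = [] := by
            by_contra hqz
            exact hw (h3 hqz w (by simp))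
          subst hqz
          simp only [List.nil_append, List.append_nil, List.length_nil, Nat.add_zero] at *
          have hstep := pv_rwL_scan n qa.length z qa tail' w hzz hw
            (by simp only [List.length_cons, List.length_append] at hlen ⊢; omega)
          have hget0 : (qa ++ 0 :: (z ++ w :: tail')).getD qa.length 0 = 0 := by
            simpa using pv_getD_append qa (0 :: (z ++ w :: tail')) 0
          rw [hget0] at hstep
          have hset : ((qa ++ 0 :: (z ++ w :: tail')).set qa.length w).set
              (qa.length + z.length + 1) 0 = qa ++ [w] ++ (z ++ 0 :: tail') := by
            rw [pv_set_append qa (z ++ w :: tail') 0 w]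
            have h1 : qa ++ w :: (z ++ w :: tail') = (qa ++ w :: z) ++ w :: tail' := by simp
            rw [h1]
            have hl : qa.length + z.length + 1 = (qa ++ w :: z).length := by simp; omega
            rw [hl, pv_set_append (qa ++ w :: z) tail' w 0]
            simp
          rw [hstep, hset]
          have ih' := ih (qa ++ [w]) [] (z ++ 0 :: tail')
            (by intro x hx; rcases List.mem_append.mp hx with hx | hx
                · exact ha x hx
                · rw [List.mem_singleton.mp hx]; exact hw)
            (by simp) (by simp)
            (by simp only [List.length_cons, List.length_append] at hlen ⊢; omega)
            (by simp only [List.length_cons, List.length_append, List.length_nil]; omega)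
          simp only [List.nil_append, List.append_nil, List.cons_append,
            List.length_append, List.length_cons, List.length_nil] at ih' ⊢
          rw [show qa.length + 1 + 0 = qa.length + 1 from rfl] at ih'
          rw [ih']
          have hfz : z.filter (fun x => x != 0) = [] :=
            List.filter_eq_nil_iff.mpr (by intro a haa; simp [hzz a haa])
          have hfrest : (z ++ 0 :: tail').filter (fun x => x != 0)
              = tail'.filter (fun x => x != 0) := by
            simp [List.filter_append, hfz, List.filter_cons]
          have hftot : ((0 : Int) :: (z ++ w :: tail')).filter (fun x => x != 0)
              = w :: tail'.filter (fun x => x != 0) := by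
            simp [List.filter_cons, List.filter_append, hfz, hw]
          rw [hfrest, hftot]
          simp only [List.append_assoc, List.cons_append, List.nil_append, List.length_cons]
          rw [show m + 1 - ((List.filter (fun x => x != 0) tail').length + 1)
              = m - (List.filter (fun x => x != 0) tail').length from by omega]
      · -- the slot already holds a non-zero: the while loop does not even start
        have hqz : qz = [] := by
          by_contra hqz
          exact hv (h3 hqz v (by simp))
        subst hqz
        simp only [List.nil_append, List.append_nil, List.length_nil, Nat.add_zero] at *
        have hstep : rwL n qa.length (qa ++ v :: tail) qa.length = qa ++ v :: tail := by
          rw [rwL, dif_neg]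
          rintro ⟨h1, -⟩
          rw [show (qa ++ v :: tail).getD qa.length 0 = v from by
            simpa using pv_getD_append qa (v :: tail) 0] at h1
          exact hv h1
        rw [hstep]
        have ih' := ih (qa ++ [v]) [] tail
          (by intro x hx; rcases List.mem_append.mp hx with hx | hx
              · exact ha x hx
              · rw [List.mem_singleton.mp hx]; exact hv)
          (by simp) (by simp) (by simpa using hlen)
          (by simp only [List.length_cons, List.length_append, List.length_nil]; omega)
        simp only [List.nil_append, List.append_nil, List.cons_append,
          List.length_append, List.length_cons, List.length_nil] at ih' ⊢
        rw [show qa.length + 1 + 0 = qa.length + 1 from rfl] at ih'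
        have hre : qa ++ v :: tail = qa ++ [v] ++ tail := by simp
        rw [show qa ++ [v] ++ tail = qa ++ v :: tail from by simp] at ih'
        rw [ih']
        have hfv : (v :: tail).filter (fun x => x != 0)
            = v :: tail.filter (fun x => x != 0) := by simp [List.filter_cons, hv]
        rw [hfv]
        simp only [List.append_assoc, List.cons_append, List.nil_append, List.length_cons]
        rw [show m + 1 - ((List.filter (fun x => x != 0) tail).length + 1)
            = m - (List.filter (fun x => x != 0) tail).length from by omega]

theorem pv_rwL_fold (n : Nat) (r : List Int) (hr : r.length = n) :
    (List.range n).foldl (fun r i => rwL n i r i) r = compactL n r := by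
  have h := pv_rwL_fold_inv n n [] [] r (by simp) (by simp) (by simp) hr (by simp [hr])
  simpa [List.range_eq_range', compactL] using h


-- ---------- the right-going while loop is the left-going one on the reversed line ----------

theorem pv_getD_reverse (r : List Int) (a : Nat) (ha : a < r.length) :
    r.reverse.getD (r.length - 1 - a) 0 = r.getD a 0 := by
  rw [List.getD_eq_getElem _ _ (by simp; omega), List.getD_eq_getElem _ _ ha,
    List.getElem_reverse]
  congr 1
  omega

theorem pv_set_reverse (r : List Int) (a : Nat) (v : Int) (ha : a < r.length) :
    r.reverse.set (r.length - 1 - a) v = (r.set a v).reverse := by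
  apply List.ext_getElem
  · simp
  · intro i h1 h2
    simp only [List.length_set, List.length_reverse] at h1
    simp only [List.getElem_set, List.getElem_reverse, List.length_set, List.length_reverse]
    have : r.length - 1 - a = i ↔ a = r.length - 1 - i := by omega
    rw [if_congr this rfl rfl]

theorem pv_rwR_eq (n m : Nat) (hm : m < n) :
    ∀ (k : Nat) (r : List Int), r.length = n → k < n →
      rwR m r k = (rwL n (n-1-m) r.reverse (n-1-k)).reverse := by
  intro k
  induction k with
  | zero =>
    intro r hr hk
    rw [rwR, dif_neg (by rintro ⟨-, h2⟩; omega)]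
    rw [rwL, dif_neg (by rintro ⟨-, h2⟩; omega), List.reverse_reverse]
  | succ k ih =>
    intro r hr hk
    have hg1 : r.reverse.getD (n-1-(k+1)) 0 = r.getD (k+1) 0 := by
      rw [show n-1-(k+1) = r.length - 1 - (k+1) from by omega]
      exact pv_getD_reverse r (k+1) (by omega)
    have hg2 : r.reverse.getD (n-1-(k+1)+1) 0 = r.getD k 0 := by
      rw [show n-1-(k+1)+1 = r.length - 1 - k from by omega]
      exact pv_getD_reverse r k (by omega)
    have hg3 : r.reverse.getD (n-1-m) 0 = r.getD m 0 := by
      rw [show n-1-m = r.length - 1 - m from by omega]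
      exact pv_getD_reverse r m (by omega)
    rw [rwR, rwL]
    by_cases h1 : r.getD (k+1) 0 = 0
    · rw [dif_pos ⟨h1, by omega⟩, dif_pos ⟨by rw [hg1]; exact h1, by omega⟩]
      by_cases h2 : r.getD k 0 ≠ 0
      · rw [if_pos (by simpa using h2), if_pos (by rw [hg2]; exact h2)]
        rw [hg2, hg3]
        rw [show r.reverse.set (n-1-m) (r.getD k 0) = (r.set m (r.getD k 0)).reverse from by
          rw [show n-1-m = r.length-1-m from by omega]
          exact pv_set_reverse r m _ (by omega)]
        rw [show ((r.set m (r.getD k 0)).reverse).set (n-1-(k+1)+1) (r.getD m 0)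
            = ((r.set m (r.getD k 0)).set k (r.getD m 0)).reverse from by
          rw [show n-1-(k+1)+1 = (r.set m (r.getD k 0)).length-1-k from by simp; omega]
          exact pv_set_reverse _ k _ (by simp; omega)]
        rw [List.reverse_reverse]
        simp
      · rw [if_neg (by simpa using h2), if_neg (by rw [hg2]; simpa using h2)]
        rw [show n-1-(k+1)+1 = n-1-k from by omega]
        exact ih r hr (by omega)
    · rw [dif_neg (by rintro ⟨hc, -⟩; exact h1 hc),
          dif_neg (by rintro ⟨hc, -⟩; rw [hg1] at hc; exact h1 hc), List.reverse_reverse]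

theorem pv_compactR_reverse (n : Nat) (r : List Int) :
    (compactL n r.reverse).reverse = compactR n r := by
  unfold compactL compactR
  simp [List.reverse_append, List.filter_reverse]

theorem pv_rwR_fold (n : Nat) (r : List Int) (hr : r.length = n) :
    (List.range n).reverse.foldl (fun r m => rwR m r m) r = compactR n r := by
  have hcongr : (List.range n).reverse.foldl (fun r m => rwR m r m) r
      = (List.range n).reverse.foldl
          (fun r m => (rwL n (n-1-m) r.reverse (n-1-m)).reverse) r := by
    apply pv_foldl_congr_inv (fun s => s.length = n)
    · exact hr
    · intro s b hs hb
      have hbn : b < n := by simpa using List.mem_range.mp (List.mem_reverse.mp hb)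
      exact pv_rwR_eq n b hbn b s hs hbn
    · intro s b hs hb
      simp [pv_rwL_length, hs]
  rw [hcongr]
  rw [pv_foldl_reverse_conj (fun i r => rwL n i r i) (fun m => n-1-m) (List.range n).reverse r]
  rw [pv_map_reverse_range n]
  rw [pv_rwL_fold n r.reverse (by simpa using hr)]
  exact pv_compactR_reverse n r


-- ---------- grid basics: Sq, gget/gset, transpose ----------

theorem pv_modify_congr {α : Type} (t : List α) (j : Nat) (f g : α → α)
    (h : ∀ (hj : j < t.length), f (t[j]) = g (t[j])) : t.modify j f = t.modify j g := by
  by_cases hj : j < t.length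
  · apply List.ext_getElem
    · simp
    · intro i h1 h2
      simp only [List.getElem_modify]
      split
      · next heq => subst heq; exact h hj
      · rfl
  · rw [List.modify_eq_self (by omega), List.modify_eq_self (by omega)]

theorem pv_modify_id {α : Type} (t : List α) (j : Nat) : t.modify j (fun a => a) = t := by
  by_cases hj : j < t.length
  · apply List.ext_getElem
    · simp
    · intro i h1 h2
      simp only [List.getElem_modify]
      split <;> rfl
  · exact List.modify_eq_self (by omega)

theorem pv_gget_lt (t : List (List Int)) (i j : Nat) (hi : i < t.length) :
    gget t i j = t[i].getD j 0 := by
  unfold gget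
  rw [List.getD_eq_getElem _ _ hi]

theorem pv_sq_modify {n : Nat} {t : List (List Int)} (h : Sq n t) (j : Nat)
    (f : List Int → List Int) (hf : ∀ r, (f r).length = r.length) : Sq n (t.modify j f) := by
  obtain ⟨h1, h2⟩ := h
  refine ⟨by simpa using h1, ?_⟩
  intro a ha
  simp only [List.length_modify] at ha
  simp only [List.getElem_modify]
  split
  · next heq => rw [hf]; exact h2 a ha
  · exact h2 a ha

theorem pv_sq_map {n : Nat} {t : List (List Int)} (h : Sq n t)
    (f : List Int → List Int) (hf : ∀ r, (f r).length = r.length) : Sq n (t.map f) := by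
  obtain ⟨h1, h2⟩ := h
  refine ⟨by simpa using h1, ?_⟩
  intro a ha
  simp only [List.length_map] at ha
  simp only [List.getElem_map]
  rw [hf]; exact h2 a ha

theorem pv_gset_sq {n : Nat} {t : List (List Int)} (h : Sq n t) (i j : Nat) (v : Int) :
    Sq n (gset t i j v) :=
  pv_sq_modify h i _ (fun r => List.length_set)

theorem pv_gget_gset {n : Nat} {t : List (List Int)} (h : Sq n t) (a b i j : Nat)
    (haa : a < n) (hb : b < n) (hi : i < n) (hj : j < n) (v : Int) :
    gget (gset t a b v) i j = if a = i ∧ b = j then v else gget t i j := by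
  obtain ⟨h1, h2⟩ := h
  unfold gset
  rw [pv_gget_lt _ i j (by simp [h1]; omega)]
  rw [List.getElem_modify]
  by_cases hai : a = i
  · subst hai
    rw [if_pos rfl]
    rw [List.getD_eq_getElem _ _ (by rw [List.length_set, h2 a (by omega)]; omega)]
    rw [List.getElem_set]
    rw [pv_gget_lt _ a j (by omega)]
    rw [List.getD_eq_getElem _ _ (by rw [h2 a (by omega)]; omega)]
    split_ifs with hbj h3
    · rfl
    · simp_all
    · simp_all
    · rfl
  · rw [if_neg hai, if_neg (by tauto)]
    rw [pv_gget_lt _ i j (by omega)]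

theorem pv_sq_transp (t : List (List Int)) (n : Nat) : Sq n (transp t n) := by
  constructor
  · simp [transp]
  · intro i hi
    simp only [transp, List.getElem_map]
    simp

theorem pv_gget_transp (t : List (List Int)) (n a b : Nat) (ha : a < n) (hb : b < n) :
    gget (transp t n) a b = gget t b a := by
  unfold transp
  rw [pv_gget_lt _ a b (by simp; omega)]
  simp only [List.getElem_map, List.getElem_range]
  rw [List.getD_eq_getElem _ _ (by simp; omega)]
  simp

theorem pv_grid_ext {n : Nat} {u w : List (List Int)} (hu : Sq n u) (hw : Sq n w)
    (h : ∀ i j, i < n → j < n → gget u i j = gget w i j) : u = w := by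
  apply List.ext_getElem
  · rw [hu.1, hw.1]
  · intro i h1 h2
    apply List.ext_getElem
    · rw [hu.2 i h1, hw.2 i h2]
    · intro j hj1 hj2
      have hin : i < n := by rw [← hu.1]; exact h1
      have hjn : j < n := by rw [← hu.2 i h1]; exact hj1
      have := h i j hin hjn
      rw [pv_gget_lt u i j h1, pv_gget_lt w i j h2,
        List.getD_eq_getElem _ _ hj1, List.getD_eq_getElem _ _ hj2] at this
      exact this

theorem pv_transp_transp {n : Nat} {t : List (List Int)} (h : Sq n t) :
    transp (transp t n) n = t := by
  apply pv_grid_ext (pv_sq_transp _ n) h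
  intro i j hi hj
  rw [pv_gget_transp _ n i j hi hj, pv_gget_transp _ n j i hj hi]

theorem pv_transp_gset {n : Nat} {t : List (List Int)} (h : Sq n t) (a b : Nat)
    (ha : a < n) (hb : b < n) (v : Int) :
    transp (gset t a b v) n = gset (transp t n) b a v := by
  apply pv_grid_ext (pv_sq_transp _ n) (pv_gset_sq (pv_sq_transp t n) b a v)
  intro i j hi hj
  rw [pv_gget_transp _ n i j hi hj]
  rw [pv_gget_gset h a b j i ha hb hj hi v]
  rw [pv_gget_gset (pv_sq_transp t n) b a i j hb ha hi hj v]
  by_cases h1 : a = j ∧ b = i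
  · rw [if_pos h1, if_pos ⟨h1.2, h1.1⟩]
  · rw [if_neg h1, if_neg (by tauto)]
    rw [pv_gget_transp _ n i j hi hj]

-- ---------- the left/right while loops only touch row j ----------

theorem pv_gset_gset_row (t : List (List Int)) (j a b : Nat) (va vb : Int) :
    gset (gset t j a va) j b vb = t.modify j (fun row => (row.set a va).set b vb) := by
  unfold gset
  rw [pv_modify_modify]

theorem pv_aWhileL_modify (n i j : Nat) :
    ∀ (d k : Nat) (t : List (List Int)), j < t.length → n - 1 - k ≤ d →
      aWhileL n i j t k = t.modify j (fun row => rwL n i row k) := by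
  intro d
  induction d with
  | zero =>
    intro k t hj hd
    rw [aWhileL, dif_neg (by rintro ⟨-, h2⟩; omega)]
    have : (fun row : List Int => rwL n i row k) = (fun row : List Int => row) := by
      funext row
      rw [rwL, dif_neg (by rintro ⟨-, h2⟩; omega)]
    rw [this, pv_modify_id]
  | succ d ih =>
    intro k t hj hd
    rw [aWhileL]
    rw [pv_gget_lt t j k hj]
    by_cases hc : t[j].getD k 0 = 0 ∧ k < n - 1
    · rw [dif_pos hc]
      rw [pv_gget_lt t j (k+1) hj]
      by_cases hnz : t[j].getD (k+1) 0 ≠ 0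
      · rw [if_pos hnz]
        rw [pv_gget_lt t j i hj, pv_gset_gset_row]
        apply pv_modify_congr
        intro hj'
        rw [rwL, dif_pos hc, if_pos hnz]
      · rw [if_neg hnz]
        rw [ih (k+1) t hj (by omega)]
        apply pv_modify_congr
        intro hj'
        conv_rhs => rw [rwL]
        rw [dif_pos hc, if_neg hnz]
    · rw [dif_neg hc]
      have heq : t.modify j (fun row => rwL n i row k)
          = t.modify j (fun row : List Int => row) := by
        apply pv_modify_congr
        intro hj'
        rw [rwL, dif_neg hc]
      rw [heq, pv_modify_id]

theorem pv_aWhileR_modify (m j : Nat) :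
    ∀ (k : Nat) (t : List (List Int)), j < t.length →
      aWhileR m j t k = t.modify j (fun row => rwR m row k) := by
  intro k
  induction k with
  | zero =>
    intro t hj
    rw [aWhileR, dif_neg (by rintro ⟨-, h2⟩; omega)]
    have : (fun row : List Int => rwR m row 0) = (fun row : List Int => row) := by
      funext row
      rw [rwR, dif_neg (by rintro ⟨-, h2⟩; omega)]
    rw [this, pv_modify_id]
  | succ k ih =>
    intro t hj
    rw [aWhileR]
    rw [pv_gget_lt t j (k+1) hj]
    by_cases hc : t[j].getD (k+1) 0 = 0 ∧ 0 < k + 1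
    · rw [dif_pos hc]
      rw [pv_gget_lt t j (k+1-1) hj]
      by_cases hnz : t[j].getD (k+1-1) 0 ≠ 0
      · rw [if_pos hnz]
        rw [pv_gget_lt t j m hj, pv_gset_gset_row]
        apply pv_modify_congr
        intro hj'
        rw [rwR, dif_pos hc, if_pos hnz]
      · rw [if_neg hnz]
        rw [show k + 1 - 1 = k from rfl]
        rw [ih t hj]
        apply pv_modify_congr
        intro hj'
        conv_rhs => rw [rwR]
        rw [dif_pos hc, if_neg (by simpa using hnz)]
        rfl
    · rw [dif_neg hc]
      have heq : t.modify j (fun row => rwR m row (k+1))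
          = t.modify j (fun row : List Int => row) := by
        apply pv_modify_congr
        intro hj'
        rw [rwR, dif_neg hc]
      rw [heq, pv_modify_id]


-- ---------- Sq is preserved by the while loops ----------

theorem pv_sq_mem {n : Nat} {t : List (List Int)} (h : Sq n t) : ∀ r ∈ t, r.length = n := by
  intro r hr
  obtain ⟨i, hi, rfl⟩ := List.mem_iff_getElem.mp hr
  exact h.2 i hi

theorem pv_sq_aWhileL {n : Nat} (i j : Nat) {s : List (List Int)} (hs : Sq n s) (hj : j < n)
    (k : Nat) : Sq n (aWhileL n i j s k) := by
  rw [pv_aWhileL_modify n i j (n-1-k) k s (by rw [hs.1]; exact hj) (Nat.le_refl _)]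
  exact pv_sq_modify hs j _ (fun r => pv_rwL_length n i r k)

theorem pv_sq_aWhileR {n : Nat} (m j : Nat) {s : List (List Int)} (hs : Sq n s) (hj : j < n)
    (k : Nat) : Sq n (aWhileR m j s k) := by
  rw [pv_aWhileR_modify m j k s (by rw [hs.1]; exact hj)]
  exact pv_sq_modify hs j _ (fun r => pv_rwR_length m k r)

-- ---------- A's left/right branches = per-row compaction (square grids) ----------

theorem pv_left_inner (n i : Nat) (t : List (List Int)) (h : Sq n t) :
    (List.range n).foldl (fun t j => aWhileL n i j t i) t
      = t.map (fun row => rwL n i row i) := by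
  have hcongr := pv_foldl_congr_inv (Sq n)
    (fun t j => aWhileL n i j t i)
    (fun t j => t.modify j (fun row => rwL n i row i)) (List.range n) t h
    (fun s b hs hb => pv_aWhileL_modify n i b (n-1-i) i s
      (by rw [hs.1]; exact List.mem_range.mp hb) (Nat.le_refl _))
    (fun s b hs _ => pv_sq_modify hs b _ (fun r => pv_rwL_length n i r i))
  rw [hcongr]
  rw [show List.range n = List.range t.length from by rw [h.1]]
  rw [pv_foldl_modify_mapIdx (fun _ row => rwL n i row i)]
  exact pv_mapIdx_const _ _

theorem pv_left_core (n : Nat) (t : List (List Int)) (h : Sq n t) :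
    (List.range n).foldl (fun t i => (List.range n).foldl (fun t j => aWhileL n i j t i) t) t
      = t.map (compactL n) := by
  have hcongr := pv_foldl_congr_inv (Sq n)
    (fun t i => (List.range n).foldl (fun t j => aWhileL n i j t i) t)
    (fun t i => t.map (fun row => rwL n i row i)) (List.range n) t h
    (fun s b hs _ => pv_left_inner n b s hs)
    (fun s b hs _ => pv_sq_map hs _ (fun r => pv_rwL_length n b r b))
  rw [hcongr, pv_foldl_map_comm]
  apply List.map_congr_left
  intro r hr
  exact pv_rwL_fold n r (pv_sq_mem h r hr)

theorem pv_right_inner (n m : Nat) (t : List (List Int)) (h : Sq n t) :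
    (List.range n).foldl (fun t j => aWhileR m j t m) t
      = t.map (fun row => rwR m row m) := by
  have hcongr := pv_foldl_congr_inv (Sq n)
    (fun t j => aWhileR m j t m)
    (fun t j => t.modify j (fun row => rwR m row m)) (List.range n) t h
    (fun s b hs hb => pv_aWhileR_modify m b m s (by rw [hs.1]; exact List.mem_range.mp hb))
    (fun s b hs _ => pv_sq_modify hs b _ (fun r => pv_rwR_length m m r))
  rw [hcongr]
  rw [show List.range n = List.range t.length from by rw [h.1]]
  rw [pv_foldl_modify_mapIdx (fun _ row => rwR m row m)]
  exact pv_mapIdx_const _ _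

theorem pv_right_core (n : Nat) (t : List (List Int)) (h : Sq n t) :
    (List.range n).reverse.foldl
        (fun t m => (List.range n).foldl (fun t j => aWhileR m j t m) t) t
      = t.map (compactR n) := by
  have hcongr := pv_foldl_congr_inv (Sq n)
    (fun t m => (List.range n).foldl (fun t j => aWhileR m j t m) t)
    (fun t m => t.map (fun row => rwR m row m)) (List.range n).reverse t h
    (fun s b hs _ => pv_right_inner n b s hs)
    (fun s b hs _ => pv_sq_map hs _ (fun r => pv_rwR_length b b r))
  rw [hcongr, pv_foldl_map_comm]
  apply List.map_congr_left
  intro r hr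
  exact pv_rwR_fold n r (pv_sq_mem h r hr)

-- ---------- transpose conjugation: columns are rows of the transpose (square grids) ----------

theorem pv_foldl_T_conj (n : Nat) (f fL : List (List Int) → Nat → List (List Int)) :
    ∀ (l : List Nat),
      (∀ s x, Sq n s → x ∈ l → f s x = transp (fL (transp s n) x) n) →
      (∀ s x, Sq n s → x ∈ l → Sq n (fL s x)) →
      ∀ t, Sq n t → l.foldl f t = transp (l.foldl fL (transp t n)) n := by
  intro l
  induction l with
  | nil =>
    intro _ _ t h
    exact (pv_transp_transp h).symm
  | cons x l ih =>
    intro h1 h2 t h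
    simp only [List.foldl_cons]
    rw [h1 t x h (by simp)]
    rw [ih (fun s y hs hy => h1 s y hs (by simp [hy]))
        (fun s y hs hy => h2 s y hs (by simp [hy]))
        (transp (fL (transp t n) x) n) (pv_sq_transp _ n)]
    congr 2
    exact pv_transp_transp (h2 (transp t n) x (pv_sq_transp t n) (by simp))

theorem pv_aWhileU_conj (n i j : Nat) (hi : i < n) (hj : j < n) :
    ∀ (d k : Nat) (t : List (List Int)), Sq n t → k < n → n - 1 - k ≤ d →
      aWhileU n i j t k = transp (aWhileL n i j (transp t n) k) n := by
  intro d
  induction d with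
  | zero =>
    intro k t h hk hd
    rw [aWhileU, dif_neg (by rintro ⟨-, h2⟩; omega)]
    rw [aWhileL, dif_neg (by rw [pv_gget_transp t n j k hj hk]; rintro ⟨-, h2⟩; omega)]
    exact (pv_transp_transp h).symm
  | succ d ih =>
    intro k t h hk hd
    rw [aWhileU, aWhileL, pv_gget_transp t n j k hj hk]
    by_cases hc : gget t k j = 0 ∧ k < n - 1
    · rw [dif_pos hc, dif_pos hc]
      have hk1 : k + 1 < n := by omega
      rw [pv_gget_transp t n j (k+1) hj hk1]
      by_cases hnz : gget t (k+1) j ≠ 0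
      · rw [if_pos hnz, if_pos hnz]
        rw [pv_gget_transp t n j i hj hi]
        rw [pv_transp_gset (pv_gset_sq (pv_sq_transp t n) j i _) j (k+1) hj hk1 _]
        rw [pv_transp_gset (pv_sq_transp t n) j i hj hi _]
        rw [pv_transp_transp h]
      · rw [if_neg hnz, if_neg hnz]
        exact ih (k+1) t h hk1 (by omega)
    · rw [dif_neg hc, dif_neg hc]
      exact (pv_transp_transp h).symm

theorem pv_aWhileD_conj (n m j : Nat) (hm : m < n) (hj : j < n) :
    ∀ (k : Nat) (t : List (List Int)), Sq n t → k < n →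
      aWhileD m j t k = transp (aWhileR m j (transp t n) k) n := by
  intro k
  induction k with
  | zero =>
    intro t h hk
    rw [aWhileD, dif_neg (by rintro ⟨-, h2⟩; omega)]
    rw [aWhileR, dif_neg (by rintro ⟨-, h2⟩; omega)]
    exact (pv_transp_transp h).symm
  | succ k ih =>
    intro t h hk
    have hk' : k < n := by omega
    rw [aWhileD, aWhileR, pv_gget_transp t n j (k+1) hj hk]
    by_cases hc : gget t (k+1) j = 0 ∧ 0 < k + 1
    · rw [dif_pos hc, dif_pos hc]
      rw [show k + 1 - 1 = k from rfl]
      rw [pv_gget_transp t n j k hj hk']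
      by_cases hnz : gget t k j ≠ 0
      · rw [if_pos hnz, if_pos hnz]
        rw [pv_gget_transp t n j m hj hm]
        rw [pv_transp_gset (pv_gset_sq (pv_sq_transp t n) j m _) j k hj hk' _]
        rw [pv_transp_gset (pv_sq_transp t n) j m hj hm _]
        rw [pv_transp_transp h]
      · rw [if_neg hnz, if_neg hnz]
        exact ih t h hk'
    · rw [dif_neg hc, dif_neg hc]
      exact (pv_transp_transp h).symm

theorem pv_sq_aWhileU {n : Nat} (i j : Nat) {s : List (List Int)} (hs : Sq n s)
    (hi : i < n) (hj : j < n) (k : Nat) (hk : k < n) : Sq n (aWhileU n i j s k) := by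
  rw [pv_aWhileU_conj n i j hi hj (n-1-k) k s hs hk (Nat.le_refl _)]
  exact pv_sq_transp _ n

theorem pv_sq_aWhileD {n : Nat} (m j : Nat) {s : List (List Int)} (hs : Sq n s)
    (hm : m < n) (hj : j < n) (k : Nat) (hk : k < n) : Sq n (aWhileD m j s k) := by
  rw [pv_aWhileD_conj n m j hm hj k s hs hk]
  exact pv_sq_transp _ n

theorem pv_up_core (n : Nat) (t : List (List Int)) (h : Sq n t) :
    (List.range n).foldl (fun t i => (List.range n).foldl (fun t j => aWhileU n i j t i) t) t
      = transp ((transp t n).map (compactL n)) n := by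
  rw [pv_foldl_T_conj n _
      (fun s i => (List.range n).foldl (fun s j => aWhileL n i j s i) s) (List.range n)
      (fun s i hs hi =>
        pv_foldl_T_conj n _ _ (List.range n)
          (fun s2 j hs2 hjm =>
            pv_aWhileU_conj n i j (List.mem_range.mp hi) (List.mem_range.mp hjm)
              (n-1-i) i s2 hs2 (List.mem_range.mp hi) (Nat.le_refl _))
          (fun s2 j hs2 hjm => pv_sq_aWhileL i j hs2 (List.mem_range.mp hjm) i) s hs)
      (fun s i hs _ =>
        pv_foldl_preserve (Sq n) _ (List.range n) s hs
          (fun s2 j hs2 hjm => pv_sq_aWhileL i j hs2 (List.mem_range.mp hjm) i)) t h]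
  congr 1
  exact pv_left_core n (transp t n) (pv_sq_transp t n)

theorem pv_down_core (n : Nat) (t : List (List Int)) (h : Sq n t) :
    (List.range n).reverse.foldl
        (fun t m => (List.range n).foldl (fun t j => aWhileD m j t m) t) t
      = transp ((transp t n).map (compactR n)) n := by
  rw [pv_foldl_T_conj n _
      (fun s m => (List.range n).foldl (fun s j => aWhileR m j s m) s) (List.range n).reverse
      (fun s m hs hm =>
        pv_foldl_T_conj n _ _ (List.range n)
          (fun s2 j hs2 hjm =>
            pv_aWhileD_conj n m j (List.mem_range.mp (List.mem_reverse.mp hm))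
              (List.mem_range.mp hjm) m s2 hs2
              (List.mem_range.mp (List.mem_reverse.mp hm)))
          (fun s2 j hs2 hjm => pv_sq_aWhileR m j hs2 (List.mem_range.mp hjm) m) s hs)
      (fun s m hs _ =>
        pv_foldl_preserve (Sq n) _ (List.range n) s hs
          (fun s2 j hs2 hjm => pv_sq_aWhileR m j hs2 (List.mem_range.mp hjm) m)) t h]
  congr 1
  exact pv_right_core n (transp t n) (pv_sq_transp t n)

-- ---------- core / patch: from square grids to any grid with an n×n active block ----------

theorem pv_core_getD (n : Nat) (t : List (List Int)) (i : Nat) (hi : i < n) :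
    (core n t).getD i [] = (t.getD i []).take n := by
  unfold core
  rw [List.getD_eq_getElem _ _ (by simp; exact hi)]
  simp

theorem pv_patch_core (n : Nat) (t : List (List Int)) : patch n t (core n t) = t := by
  unfold patch
  apply List.ext_getElem
  · simp
  · intro i h1 h2
    simp only [List.getElem_mapIdx]
    by_cases hin : i < n
    · rw [if_pos hin, pv_core_getD n t i hin, List.getD_eq_getElem _ _ h2]
      exact List.take_append_drop n t[i]
    · rw [if_neg hin]

theorem pv_sq_core (n : Nat) (t : List (List Int)) (hge : GeN n t) : Sq n (core n t) := by
  constructor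
  · simp [core]
  · intro i hi
    simp only [core, List.length_map, List.length_range] at hi
    simp only [core, List.getElem_map, List.getElem_range, List.length_take]
    have := hge.2 i hi
    omega

theorem pv_gget_patch {n : Nat} {s : List (List Int)} (hs : Sq n s) (t0 : List (List Int))
    (ht : n ≤ t0.length) (i j : Nat) (hi : i < n) (hj : j < n) :
    gget (patch n t0 s) i j = gget s i j := by
  have hit : i < t0.length := lt_of_lt_of_le hi ht
  have hsl : (s.getD i []).length = n := by
    rw [List.getD_eq_getElem _ _ (by rw [hs.1]; exact hi)]
    exact hs.2 i (by rw [hs.1]; exact hi)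
  unfold patch
  rw [pv_gget_lt _ i j (by simpa using hit)]
  rw [List.getElem_mapIdx, if_pos hi]
  rw [pv_getD_append_left _ _ j (by rw [hsl]; exact hj)]
  rfl

theorem pv_gset_patch {n : Nat} {s : List (List Int)} (hs : Sq n s) (t0 : List (List Int))
    (ht : n ≤ t0.length) (i j : Nat) (hi : i < n) (hj : j < n) (v : Int) :
    gset (patch n t0 s) i j v = patch n t0 (gset s i j v) := by
  have hsi : i < s.length := by rw [hs.1]; exact hi
  unfold patch gset
  apply List.ext_getElem
  · simp
  · intro a h1 h2
    simp only [List.length_modify, List.length_mapIdx] at h1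
    simp only [List.getElem_modify, List.getElem_mapIdx]
    by_cases hia : i = a
    · subst hia
      rw [if_pos rfl, if_pos hi, if_pos hi]
      have hgs : (s.modify i (fun r => r.set j v)).getD i [] = s[i].set j v := by
        rw [List.getD_eq_getElem _ _ (by simpa using hsi), List.getElem_modify, if_pos rfl]
      rw [hgs, List.getD_eq_getElem _ _ hsi]
      exact pv_set_append_left _ _ j v (by rw [hs.2 i hsi]; exact hj)
    · rw [if_neg hia]
      have hgs : (s.modify i (fun r => r.set j v)).getD a [] = s.getD a [] := by
        by_cases ha : a < s.length
        · rw [List.getD_eq_getElem _ _ (by simpa using ha), List.getD_eq_getElem _ _ ha,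
            List.getElem_modify, if_neg hia]
        · rw [List.getD_eq_default _ _ (by simp; omega), List.getD_eq_default _ _ (by omega)]
      rw [hgs]

-- simulation: each while loop acts on a patched grid exactly as on its active block
theorem pv_aWhileU_patch (n i j : Nat) (t0 : List (List Int)) (ht : n ≤ t0.length)
    (hi : i < n) (hj : j < n) :
    ∀ (d k : Nat) (s : List (List Int)), Sq n s → k < n → n - 1 - k ≤ d →
      aWhileU n i j (patch n t0 s) k = patch n t0 (aWhileU n i j s k) := by
  intro d
  induction d with
  | zero =>
    intro k s hs hk hd
    conv_lhs => rw [aWhileU]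
    rw [dif_neg (by rintro ⟨-, h2⟩; omega)]
    conv_rhs => rw [aWhileU]
    rw [dif_neg (by rintro ⟨-, h2⟩; omega)]
  | succ d ih =>
    intro k s hs hk hd
    conv_lhs => rw [aWhileU]
    conv_rhs => rw [aWhileU]
    rw [pv_gget_patch hs t0 ht k j hk hj]
    by_cases hc : gget s k j = 0 ∧ k < n - 1
    · rw [dif_pos hc, dif_pos hc]
      have hk1 : k + 1 < n := by omega
      rw [pv_gget_patch hs t0 ht (k+1) j hk1 hj]
      by_cases hnz : gget s (k+1) j ≠ 0
      · rw [if_pos hnz, if_pos hnz, pv_gget_patch hs t0 ht i j hi hj]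
        rw [pv_gset_patch hs t0 ht i j hi hj _]
        rw [pv_gset_patch (pv_gset_sq hs i j _) t0 ht (k+1) j hk1 hj _]
      · rw [if_neg hnz, if_neg hnz]
        exact ih (k+1) s hs hk1 (by omega)
    · rw [dif_neg hc, dif_neg hc]

theorem pv_aWhileD_patch (n m j : Nat) (t0 : List (List Int)) (ht : n ≤ t0.length)
    (hm : m < n) (hj : j < n) :
    ∀ (k : Nat) (s : List (List Int)), Sq n s → k < n →
      aWhileD m j (patch n t0 s) k = patch n t0 (aWhileD m j s k) := by
  intro k
  induction k with
  | zero =>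
    intro s hs hk
    conv_lhs => rw [aWhileD]
    rw [dif_neg (by rintro ⟨-, h2⟩; omega)]
    conv_rhs => rw [aWhileD]
    rw [dif_neg (by rintro ⟨-, h2⟩; omega)]
  | succ k ih =>
    intro s hs hk
    have hk' : k < n := by omega
    conv_lhs => rw [aWhileD]
    conv_rhs => rw [aWhileD]
    rw [pv_gget_patch hs t0 ht (k+1) j hk hj]
    by_cases hc : gget s (k+1) j = 0 ∧ 0 < k + 1
    · rw [dif_pos hc, dif_pos hc]
      rw [show k + 1 - 1 = k from rfl]
      rw [pv_gget_patch hs t0 ht k j hk' hj]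
      by_cases hnz : gget s k j ≠ 0
      · rw [if_pos hnz, if_pos hnz, pv_gget_patch hs t0 ht m j hm hj]
        rw [pv_gset_patch hs t0 ht m j hm hj _]
        rw [pv_gset_patch (pv_gset_sq hs m j _) t0 ht k j hk' hj _]
      · rw [if_neg hnz, if_neg hnz]
        exact ih s hs hk'
    · rw [dif_neg hc, dif_neg hc]

theorem pv_aWhileL_patch (n i j : Nat) (t0 : List (List Int)) (ht : n ≤ t0.length)
    (hi : i < n) (hj : j < n) :
    ∀ (d k : Nat) (s : List (List Int)), Sq n s → k < n → n - 1 - k ≤ d →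
      aWhileL n i j (patch n t0 s) k = patch n t0 (aWhileL n i j s k) := by
  intro d
  induction d with
  | zero =>
    intro k s hs hk hd
    conv_lhs => rw [aWhileL]
    rw [dif_neg (by rintro ⟨-, h2⟩; omega)]
    conv_rhs => rw [aWhileL]
    rw [dif_neg (by rintro ⟨-, h2⟩; omega)]
  | succ d ih =>
    intro k s hs hk hd
    conv_lhs => rw [aWhileL]
    conv_rhs => rw [aWhileL]
    rw [pv_gget_patch hs t0 ht j k hj hk]
    by_cases hc : gget s j k = 0 ∧ k < n - 1
    · rw [dif_pos hc, dif_pos hc]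
      have hk1 : k + 1 < n := by omega
      rw [pv_gget_patch hs t0 ht j (k+1) hj hk1]
      by_cases hnz : gget s j (k+1) ≠ 0
      · rw [if_pos hnz, if_pos hnz, pv_gget_patch hs t0 ht j i hj hi]
        rw [pv_gset_patch hs t0 ht j i hj hi _]
        rw [pv_gset_patch (pv_gset_sq hs j i _) t0 ht j (k+1) hj hk1 _]
      · rw [if_neg hnz, if_neg hnz]
        exact ih (k+1) s hs hk1 (by omega)
    · rw [dif_neg hc, dif_neg hc]

theorem pv_aWhileR_patch (n m j : Nat) (t0 : List (List Int)) (ht : n ≤ t0.length)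
    (hm : m < n) (hj : j < n) :
    ∀ (k : Nat) (s : List (List Int)), Sq n s → k < n →
      aWhileR m j (patch n t0 s) k = patch n t0 (aWhileR m j s k) := by
  intro k
  induction k with
  | zero =>
    intro s hs hk
    conv_lhs => rw [aWhileR]
    rw [dif_neg (by rintro ⟨-, h2⟩; omega)]
    conv_rhs => rw [aWhileR]
    rw [dif_neg (by rintro ⟨-, h2⟩; omega)]
  | succ k ih =>
    intro s hs hk
    have hk' : k < n := by omega
    conv_lhs => rw [aWhileR]
    conv_rhs => rw [aWhileR]
    rw [pv_gget_patch hs t0 ht j (k+1) hj hk]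
    by_cases hc : gget s j (k+1) = 0 ∧ 0 < k + 1
    · rw [dif_pos hc, dif_pos hc]
      rw [show k + 1 - 1 = k from rfl]
      rw [pv_gget_patch hs t0 ht j k hj hk']
      by_cases hnz : gget s j k ≠ 0
      · rw [if_pos hnz, if_pos hnz, pv_gget_patch hs t0 ht j m hj hm]
        rw [pv_gset_patch hs t0 ht j m hj hm _]
        rw [pv_gset_patch (pv_gset_sq hs j m _) t0 ht j k hj hk' _]
      · rw [if_neg hnz, if_neg hnz]
        exact ih s hs hk'
    · rw [dif_neg hc, dif_neg hc]

-- ---------- A's four branches on any admitted grid ----------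

theorem pv_up_general (n : Nat) (t0 : List (List Int)) (hge : GeN n t0) :
    (List.range n).foldl (fun t i => (List.range n).foldl (fun t j => aWhileU n i j t i) t) t0
      = patch n t0 (transp ((transp (core n t0) n).map (compactL n)) n) := by
  have hs0 : Sq n (core n t0) := pv_sq_core n t0 hge
  have hsim := pv_foldl_sim (fun t s => Sq n s ∧ t = patch n t0 s)
      (fun t i => (List.range n).foldl (fun t j => aWhileU n i j t i) t)
      (fun s i => (List.range n).foldl (fun s j => aWhileU n i j s i) s)
      (List.range n) t0 (core n t0) ⟨hs0, (pv_patch_core n t0).symm⟩ ?_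
  · rw [hsim.2, pv_up_core n (core n t0) hs0]
  · intro t s x hts hx
    have hx' : x < n := List.mem_range.mp hx
    refine pv_foldl_sim (fun t s => Sq n s ∧ t = patch n t0 s) _ _ (List.range n) t s hts ?_
    intro t' s' y hts' hy
    have hy' : y < n := List.mem_range.mp hy
    refine ⟨pv_sq_aWhileU x y hts'.1 hx' hy' x hx', ?_⟩
    rw [hts'.2]
    exact pv_aWhileU_patch n x y t0 hge.1 hx' hy' (n-1-x) x s' hts'.1 hx' (Nat.le_refl _)

theorem pv_down_general (n : Nat) (t0 : List (List Int)) (hge : GeN n t0) :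
    (List.range n).reverse.foldl
        (fun t m => (List.range n).foldl (fun t j => aWhileD m j t m) t) t0
      = patch n t0 (transp ((transp (core n t0) n).map (compactR n)) n) := by
  have hs0 : Sq n (core n t0) := pv_sq_core n t0 hge
  have hsim := pv_foldl_sim (fun t s => Sq n s ∧ t = patch n t0 s)
      (fun t m => (List.range n).foldl (fun t j => aWhileD m j t m) t)
      (fun s m => (List.range n).foldl (fun s j => aWhileD m j s m) s)
      (List.range n).reverse t0 (core n t0) ⟨hs0, (pv_patch_core n t0).symm⟩ ?_
  · rw [hsim.2, pv_down_core n (core n t0) hs0]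
  · intro t s x hts hx
    have hx' : x < n := List.mem_range.mp (List.mem_reverse.mp hx)
    refine pv_foldl_sim (fun t s => Sq n s ∧ t = patch n t0 s) _ _ (List.range n) t s hts ?_
    intro t' s' y hts' hy
    have hy' : y < n := List.mem_range.mp hy
    refine ⟨pv_sq_aWhileD x y hts'.1 hx' hy' x hx', ?_⟩
    rw [hts'.2]
    exact pv_aWhileD_patch n x y t0 hge.1 hx' hy' x s' hts'.1 hx'

theorem pv_left_general (n : Nat) (t0 : List (List Int)) (hge : GeN n t0) :
    (List.range n).foldl (fun t i => (List.range n).foldl (fun t j => aWhileL n i j t i) t) t0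
      = patch n t0 ((core n t0).map (compactL n)) := by
  have hs0 : Sq n (core n t0) := pv_sq_core n t0 hge
  have hsim := pv_foldl_sim (fun t s => Sq n s ∧ t = patch n t0 s)
      (fun t i => (List.range n).foldl (fun t j => aWhileL n i j t i) t)
      (fun s i => (List.range n).foldl (fun s j => aWhileL n i j s i) s)
      (List.range n) t0 (core n t0) ⟨hs0, (pv_patch_core n t0).symm⟩ ?_
  · rw [hsim.2, pv_left_core n (core n t0) hs0]
  · intro t s x hts hx
    have hx' : x < n := List.mem_range.mp hx
    refine pv_foldl_sim (fun t s => Sq n s ∧ t = patch n t0 s) _ _ (List.range n) t s hts ?_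
    intro t' s' y hts' hy
    have hy' : y < n := List.mem_range.mp hy
    refine ⟨pv_sq_aWhileL x y hts'.1 hy' x, ?_⟩
    rw [hts'.2]
    exact pv_aWhileL_patch n x y t0 hge.1 hx' hy' (n-1-x) x s' hts'.1 hx' (Nat.le_refl _)

theorem pv_right_general (n : Nat) (t0 : List (List Int)) (hge : GeN n t0) :
    (List.range n).reverse.foldl
        (fun t m => (List.range n).foldl (fun t j => aWhileR m j t m) t) t0
      = patch n t0 ((core n t0).map (compactR n)) := by
  have hs0 : Sq n (core n t0) := pv_sq_core n t0 hge
  have hsim := pv_foldl_sim (fun t s => Sq n s ∧ t = patch n t0 s)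
      (fun t m => (List.range n).foldl (fun t j => aWhileR m j t m) t)
      (fun s m => (List.range n).foldl (fun s j => aWhileR m j s m) s)
      (List.range n).reverse t0 (core n t0) ⟨hs0, (pv_patch_core n t0).symm⟩ ?_
  · rw [hsim.2, pv_right_core n (core n t0) hs0]
  · intro t s x hts hx
    have hx' : x < n := List.mem_range.mp (List.mem_reverse.mp hx)
    refine pv_foldl_sim (fun t s => Sq n s ∧ t = patch n t0 s) _ _ (List.range n) t s hts ?_
    intro t' s' y hts' hy
    have hy' : y < n := List.mem_range.mp hy
    refine ⟨pv_sq_aWhileR x y hts'.1 hy' x, ?_⟩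
    rw [hts'.2]
    exact pv_aWhileR_patch n x y t0 hge.1 hx' hy' x s' hts'.1 hx'

-- ---------- B's branches on any grid ----------

theorem pv_pyCompact_true (r : List Int) (n : Nat) : pyCompact r n true = compactL n r := by
  simp [pyCompact, compactL]

theorem pv_pyCompact_false (r : List Int) (n : Nat) : pyCompact r n false = compactR n r := by
  simp [pyCompact, compactR]

theorem pv_transp_core (n : Nat) (t : List (List Int)) : transp t n = transp (core n t) n := by
  unfold transp
  refine List.map_congr_left (fun j hj => ?_)
  refine List.map_congr_left (fun i hi => ?_)
  have hi' := List.mem_range.mp hi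
  have hj' := List.mem_range.mp hj
  show gget t i j = gget (core n t) i j
  unfold gget
  rw [pv_core_getD n t i hi']
  exact (pv_getD_take _ n j hj').symm

theorem pv_b_rows_general (n : Nat) (tile : List (List Int)) (fr : Bool) :
    (List.range n).foldl
        (fun t i => t.modify i (fun row => pyCompact (row.take n) n fr ++ row.drop n)) tile
      = patch n tile ((core n tile).map (fun r => pyCompact r n fr)) := by
  rw [pv_foldl_modify_range (fun _ row => pyCompact (row.take n) n fr ++ row.drop n) n tile]
  unfold patch
  apply pv_mapIdx_congr
  intro i hi
  by_cases hin : i < n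
  · rw [if_pos hin, if_pos hin]
    have hmap : ((core n tile).map (fun r => pyCompact r n fr)).getD i []
        = pyCompact ((tile.getD i []).take n) n fr := by
      rw [List.getD_eq_getElem _ _ (by simp [core]; exact hin)]
      simp [core]
    rw [hmap, List.getD_eq_getElem _ _ hi]
  · rw [if_neg hin, if_neg hin]

theorem pv_b_cols_general (n : Nat) (tile : List (List Int)) (fr : Bool) :
    (List.range n).foldl
        (fun t i => t.modify i (fun row =>
          (transp ((List.range n).foldl
              (fun g j => g.modify j (fun c => pyCompact c n fr)) (transp tile n)) n).getD i []
            ++ row.drop n)) tile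
      = patch n tile (transp ((transp (core n tile) n).map (fun c => pyCompact c n fr)) n) := by
  have hmid : (List.range n).foldl
      (fun g j => g.modify j (fun c => pyCompact c n fr)) (transp tile n)
      = (transp tile n).map (fun c => pyCompact c n fr) := by
    rw [show List.range n = List.range (transp tile n).length from by
      rw [(pv_sq_transp tile n).1]]
    rw [pv_foldl_modify_mapIdx (fun _ c => pyCompact c n fr)]
    exact pv_mapIdx_const _ _
  rw [hmid, pv_transp_core n tile]
  rw [pv_foldl_modify_range
    (fun i row => (transp ((transp (core n tile) n).map (fun c => pyCompact c n fr)) n).getD i []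
      ++ row.drop n) n tile]
  rfl

-- Pre_ (in its non-trivial branch) gives the active block
theorem pv_pre_ge {tile : List (List Int)} {N : Int}
    (h1 : N ≤ (tile.length : Int)) (h2 : ∀ r ∈ tile.take N.toNat, N ≤ (r.length : Int)) :
    GeN N.toNat tile := by
  constructor
  · omega
  · intro i hi
    have hit : i < tile.length := by omega
    have hmem : tile.getD i [] ∈ tile.take N.toNat := by
      rw [List.getD_eq_getElem _ _ hit]
      have hgt : tile[i] = (tile.take N.toNat)[i]'(by simp; omega) := by
        simp [List.getElem_take]
      rw [hgt]
      exact List.getElem_mem _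
    have := h2 _ hmem
    omega

theorem del_zero_spec : Claim_equal_del_zero := by
  unfold Claim_equal_del_zero
  intro tile N dir _ hpre
  unfold Spec_del_zero del_zero del_zero_alt
  by_cases h1 : dir = "up"
  · subst h1
    simp only [show (("up":String) == "up") = true from rfl,
      show (("up":String) == "down") = false from rfl,
      show (("up":String) == "left") = false from rfl,
      show (("up":String) == "right") = false from rfl,
      Bool.or_false, Bool.false_eq_true, if_true, if_false]
    rcases hpre (by tauto) with hN | ⟨hlen, hrows⟩
    · have h0 : N.toNat = 0 := by omega
      rw [h0]; simp
    · have hge := pv_pre_ge hlen hrows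
      rw [pv_up_general N.toNat tile hge, pv_b_cols_general N.toNat tile true]
      simp only [pv_pyCompact_true]
  · by_cases h2 : dir = "down"
    · subst h2
      simp only [show (("down":String) == "up") = false from rfl,
        show (("down":String) == "down") = true from rfl,
        show (("down":String) == "left") = false from rfl,
        show (("down":String) == "right") = false from rfl,
        Bool.or_false, Bool.false_or, Bool.false_eq_true, if_true, if_false]
      rcases hpre (by tauto) with hN | ⟨hlen, hrows⟩
      · have h0 : N.toNat = 0 := by omega
        rw [h0]; simp
      · have hge := pv_pre_ge hlen hrows
        rw [pv_down_general N.toNat tile hge, pv_b_cols_general N.toNat tile false]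
        simp only [pv_pyCompact_false]
    · by_cases h3 : dir = "right"
      · subst h3
        simp only [show (("right":String) == "up") = false from rfl,
          show (("right":String) == "down") = false from rfl,
          show (("right":String) == "left") = false from rfl,
          show (("right":String) == "right") = true from rfl,
          Bool.or_false, Bool.false_or, Bool.false_eq_true, if_true, if_false]
        rcases hpre (by tauto) with hN | ⟨hlen, hrows⟩
        · have h0 : N.toNat = 0 := by omega
          rw [h0]; simp
        · have hge := pv_pre_ge hlen hrows
          rw [pv_right_general N.toNat tile hge, pv_b_rows_general N.toNat tile false]
          simp only [pv_pyCompact_false]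
      · by_cases h4 : dir = "left"
        · subst h4
          simp only [show (("left":String) == "up") = false from rfl,
            show (("left":String) == "down") = false from rfl,
            show (("left":String) == "left") = true from rfl,
            show (("left":String) == "right") = false from rfl,
            Bool.or_false, Bool.true_or, Bool.false_eq_true, if_true, if_false]
          rcases hpre (by tauto) with hN | ⟨hlen, hrows⟩
          · have h0 : N.toNat = 0 := by omega
            rw [h0]; simp
          · have hge := pv_pre_ge hlen hrows
            rw [pv_left_general N.toNat tile hge, pv_b_rows_general N.toNat tile true]
            simp only [pv_pyCompact_true]
        · have e1 : ¬ ((dir == "up") = true) := by simpa using h1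
          have e2 : ¬ ((dir == "down") = true) := by simpa using h2
          have e3 : ¬ ((dir == "right") = true) := by simpa using h3
          have e4 : ¬ ((dir == "left") = true) := by simpa using h4
          have e5 : ¬ ((dir == "left" || dir == "right") = true) := by
            simp only [Bool.or_eq_true, beq_iff_eq]
            exact not_or.mpr ⟨h4, h3⟩
          have e6 : ¬ ((dir == "up" || dir == "down") = true) := by
            simp only [Bool.or_eq_true, beq_iff_eq]
            exact not_or.mpr ⟨h1, h2⟩
          rw [if_neg e1, if_neg e2, if_neg e3, if_neg e4, if_neg e5, if_neg e6]
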